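-- pv_equiv track=rewrite | github.com/kunal0011/myWorksSpace | python/src/leetcode/slidingwindow/findKLengthSubstringsWithNoRepeatedCharacters1100.py | findKLengthSubstringsWithNoRepeatedCharacters
-- ===== SOURCE A (Python) =====
-- def findKLengthSubstringsWithNoRepeatedCharacters(s: str, k: int) -> list[str]:
--     n = len(s)
--     if k > n:
--         return []
--
--     char_set = set()
--     result = []
--     left = 0
--
--     for right in range(n):
--         while s[right] in char_set:
--             char_set.remove(s[left])
--             left += 1
--
--         char_set.add(s[right])
--
--         if right - left + 1 == k:
--             result.append(s[left:right + 1])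
--             char_set.remove(s[left])
--             left += 1
--
--     return result
-- ===== SOURCE B (Python) =====
-- def findKLengthSubstringsWithNoRepeatedCharacters(s: str, k: int) -> list[str]:
--     n = len(s)
--     if k < 1 or k > n:
--         return []
--     return [s[i:i + k] for i in range(n - k + 1) if len(set(s[i:i + k])) == k]
-- ===== Notes on version B (the rewrite author's own statement) =====
-- stated objective: simpler
-- what changed: Replaces the stateful sliding-window (set + two pointers + in-loop eviction) by a one-line comprehension that checks each length-k window independently with len(set(window)) == k.
import Mathlib
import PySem

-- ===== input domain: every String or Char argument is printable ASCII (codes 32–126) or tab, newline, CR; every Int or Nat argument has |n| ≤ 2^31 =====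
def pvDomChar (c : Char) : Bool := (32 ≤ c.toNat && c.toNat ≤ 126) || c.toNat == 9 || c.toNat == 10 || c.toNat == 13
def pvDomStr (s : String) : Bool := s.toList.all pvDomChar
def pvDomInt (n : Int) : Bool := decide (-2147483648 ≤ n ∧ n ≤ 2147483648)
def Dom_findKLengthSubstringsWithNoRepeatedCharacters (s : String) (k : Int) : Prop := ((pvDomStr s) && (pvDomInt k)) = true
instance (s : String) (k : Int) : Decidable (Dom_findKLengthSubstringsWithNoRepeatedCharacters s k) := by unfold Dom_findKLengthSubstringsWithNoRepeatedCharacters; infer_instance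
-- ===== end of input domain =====

-- B replaces A's stateful sliding window (set + two pointers) by independent per-window
-- distinctness checks via len(set(window)) == k; objective: simpler. Equal return values proved.

-- ===== PORT A =====
-- A's inner `while s[right] in char_set:` loop; fuel makes it structural (fuel = len(s) suffices,
-- since left ≤ right < len(s)).  `char_set.remove(s[left])` is ported as Set.discard: s[left] is
-- always a member here, where Python's set.remove equals set.discard; likewise `s[left]` is ported
-- with getD because left is always in range (left ≤ right < len(s)), so no IndexError occurs.
def fkWhile (cs : List Char) (c : Char) : Nat → PySem.Set Char × Nat → PySem.Set Char × Nat
  | 0, st => st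
  | fuel + 1, (charSet, left) =>
      if PySem.Set.contains charSet c then
        fkWhile cs c fuel (PySem.Set.discard charSet (cs.getD left ' '), left + 1)
      else (charSet, left)

-- body of A's `for right in range(n):` loop over the state (char_set, result, left)
def fkStep (cs : List Char) (k : Int) (st : PySem.Set Char × List String × Nat) (right : Nat) :
    PySem.Set Char × List String × Nat :=
  let p := fkWhile cs (cs.getD right ' ') cs.length (st.1, st.2.2)
  let charSet := PySem.Set.add p.1 (cs.getD right ' ')
  if ((right : Int) - (p.2 : Int) + 1) == k then
    (PySem.Set.discard charSet (cs.getD p.2 ' '),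
     st.2.1 ++ [String.ofList (PySem.List.slice cs (some (p.2 : Int)) (some ((right : Int) + 1)))],
     p.2 + 1)
  else (charSet, st.2.1, p.2)

def findKLengthSubstringsWithNoRepeatedCharacters (s : String) (k : Int) : List String :=
  let cs := s.toList
  let n := cs.length
  if k > (n : Int) then []
  else
    let st := (List.range n).foldl (fkStep cs k) (PySem.Set.empty, ([], 0))
    st.2.1

-- ===== PORT B =====
def findKLengthSubstringsWithNoRepeatedCharacters_alt (s : String) (k : Int) : List String :=
  let cs := s.toList
  let n := cs.length
  if k < 1 ∨ k > (n : Int) then []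
  else
    (List.range ((n : Int) - k + 1).toNat).filterMap (fun (i : Nat) =>
      let w := PySem.List.slice cs (some (i : Int)) (some ((i : Int) + k))
      if ((PySem.Set.len (PySem.Set.ofList w) : Int) == k) then some (String.ofList w) else none)

-- ===== PRECONDITION & SPEC =====
def Spec_findKLengthSubstringsWithNoRepeatedCharacters (s : String) (k : Int) (out : List String) : Prop := out = findKLengthSubstringsWithNoRepeatedCharacters_alt s k
instance (s : String) (k : Int) (out : List String) : Decidable (Spec_findKLengthSubstringsWithNoRepeatedCharacters s k out) := by unfold Spec_findKLengthSubstringsWithNoRepeatedCharacters; infer_instance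

-- ===== CLAIM (what is proved, stated in full; the proofs are below) =====
def Claim_equal_findKLengthSubstringsWithNoRepeatedCharacters : Prop := ∀ (s : String) (k : Int), Dom_findKLengthSubstringsWithNoRepeatedCharacters s k → Spec_findKLengthSubstringsWithNoRepeatedCharacters s k (findKLengthSubstringsWithNoRepeatedCharacters s k)

-- ===== LEMMAS AND PROOFS =====

-- the window s[a:b] of the proof, as a list of chars
def win (cs : List Char) (a b : Nat) : List Char := (cs.drop a).take (b - a)

-- A's result after processing the first r characters (k ≥ 1, kn = k.toNat)
def resUpTo (cs : List Char) (kn r : Nat) : List String :=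
  (List.range (r + 1 - kn)).filterMap (fun i =>
    if (win cs i (i + kn)).Nodup then some (String.ofList (win cs i (i + kn))) else none)

lemma win_cons (cs : List Char) {a b : Nat} (hab : a < b) (ha : a < cs.length) :
    win cs a b = cs.getD a ' ' :: win cs (a + 1) b := by
  unfold win
  rw [List.drop_eq_getElem_cons ha, show b - a = (b - (a+1)) + 1 by omega,
      List.take_succ_cons]
  simp [List.getD, List.getElem?_eq_getElem ha]

lemma win_snoc (cs : List Char) {a b : Nat} (hab : a ≤ b) (hb : b < cs.length) :
    win cs a (b + 1) = win cs a b ++ [cs.getD b ' '] := by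
  unfold win
  rw [show b + 1 - a = (b - a) + 1 by omega, List.take_add_one]
  have h1 : (cs.drop a)[b-a]? = some cs[b] := by
    rw [List.getElem?_drop, show a + (b - a) = b by omega]
    exact List.getElem?_eq_getElem hb
  simp [h1, List.getD, List.getElem?_eq_getElem hb]

lemma win_length (cs : List Char) {a b : Nat} (hb : b ≤ cs.length) :
    (win cs a b).length = b - a := by
  simp [win]; omega

lemma win_not_nodup_mono (cs : List Char) {a b : Nat} (hab : a ≤ b) (hb : b < cs.length)
    (h : ¬ (win cs a b).Nodup) : ¬ (win cs a (b + 1)).Nodup := by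
  rw [win_snoc cs hab hb]
  intro hnd
  exact h (hnd.sublist (List.sublist_append_left _ _))

lemma win_nodup_tail (cs : List Char) {a b : Nat} (h : (win cs a b).Nodup) :
    (win cs (a + 1) b).Nodup := by
  by_cases hab : a < b
  · by_cases ha : a < cs.length
    · rw [win_cons cs hab ha] at h
      exact (List.nodup_cons.1 h).2
    · unfold win
      rw [List.drop_eq_nil_of_le (by omega)]
      simp
  · unfold win
    rw [show b - (a+1) = 0 by omega]
    simp

lemma discard_win (cs : List Char) {a b : Nat} (hab : a < b) (ha : a < cs.length)
    (hnd : (win cs a b).Nodup) :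
    PySem.Set.discard (win cs a b) (cs.getD a ' ') = win cs (a + 1) b := by
  have hcons := win_cons cs hab ha
  rw [hcons]
  simp only [PySem.Set.discard, List.filter_cons, beq_self_eq_true, Bool.not_true,
    Bool.false_eq_true, if_false]
  rw [List.filter_eq_self.2]
  intro x hx
  have : x ≠ cs.getD a ' ' := by
    rw [hcons] at hnd
    intro h; subst h
    exact (List.nodup_cons.1 hnd).1 hx
  simpa [List.getD] using this

lemma not_nodup_snoc (cs : List Char) {l r : Nat} (hlr : l ≤ r) (hr : r < cs.length)
    (hc : cs.getD r ' ' ∈ win cs l r) : ¬ (win cs l (r + 1)).Nodup := by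
  rw [win_snoc cs hlr hr]
  intro hnd
  rw [List.nodup_append] at hnd
  exact hnd.2.2 _ hc _ (List.mem_singleton_self _) rfl

lemma fkWhile_spec (cs : List Char) (c : Char) (fuel : Nat) : ∀ (left r : Nat),
    left ≤ r → r ≤ cs.length → r - left ≤ fuel →
    (win cs left r).Nodup →
    ∃ L, left ≤ L ∧ L ≤ r ∧
      fkWhile cs c fuel (win cs left r, left) = (win cs L r, L) ∧
      c ∉ win cs L r ∧ (win cs L r).Nodup ∧
      (∀ l, left ≤ l → l < L → c ∈ win cs l r) := by
  induction fuel with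
  | zero =>
    intro left r hlr hr hf hnd
    have : left = r := by omega
    subst this
    refine ⟨left, le_refl _, le_refl _, rfl, ?_, hnd, by omega⟩
    simp [win]
  | succ fuel ih =>
    intro left r hlr hr hf hnd
    by_cases hc : c ∈ win cs left r
    · have hne : win cs left r ≠ [] := by intro h; rw [h] at hc; simp at hc
      have hab : left < r := by
        by_contra h
        have : left = r := by omega
        apply hne; subst this; simp [win]
      have ha : left < cs.length := by
        by_contra h
        apply hne
        simp [win, List.drop_eq_nil_of_le (le_of_not_gt h)]
      have hnd' : (win cs (left+1) r).Nodup := win_nodup_tail cs hnd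
      have hstep : fkWhile cs c (fuel+1) (win cs left r, left)
          = fkWhile cs c fuel (win cs (left+1) r, left+1) := by
        show (if PySem.Set.contains (win cs left r) c then _ else _) = _
        rw [if_pos (by simpa [PySem.Set.contains_iff] using hc), discard_win cs hab ha hnd]
      obtain ⟨L, h1, h2, h3, h4, h5, h6⟩ := ih (left+1) r hab hr (by omega) hnd'
      exact ⟨L, by omega, h2, by rw [hstep, h3], h4, h5, by
        intro l hl1 hl2
        rcases Nat.eq_or_lt_of_le hl1 with h | h
        · subst h; exact hc
        · exact h6 l h hl2⟩
    · refine ⟨left, le_refl _, hlr, ?_, hc, hnd, by omega⟩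
      show (if PySem.Set.contains (win cs left r) c then _ else _) = _
      rw [if_neg (by simpa [PySem.Set.contains_iff] using hc)]

lemma loopA (cs : List Char) (k : Int) (hk : 1 ≤ k) (r : Nat) (hr : r ≤ cs.length) :
    ∃ left, left ≤ r ∧ (r : Int) - (left : Int) < k ∧ (win cs left r).Nodup ∧
      (∀ l, l < left → ¬ (win cs l r).Nodup ∨ k ≤ (r : Int) - (l : Int)) ∧
      (List.range r).foldl (fkStep cs k) (PySem.Set.empty, ([], 0)) =
        (win cs left r, resUpTo cs k.toNat r, left) := by
  induction r with
  | zero =>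
    refine ⟨0, le_refl _, by omega, by simp [win], by omega, ?_⟩
    simp [resUpTo, win, PySem.Set.empty, show 0 + 1 - k.toNat = 0 by omega]
  | succ r ih =>
    obtain ⟨left, h1, h2, h3, h4, h5⟩ := ih (by omega)
    set c := cs.getD r ' ' with hc_def
    obtain ⟨L, g1, g2, g3, g4, g5, g6⟩ :=
      fkWhile_spec cs c cs.length left r h1 (by omega) (by omega) h3
    have hrlen : r < cs.length := by omega
    have hstep : (List.range (r+1)).foldl (fkStep cs k) (PySem.Set.empty, ([], 0)) =
        fkStep cs k (win cs left r, resUpTo cs k.toNat r, left) r := by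
      rw [List.range_succ, List.foldl_append, h5]; rfl
    have haddw : PySem.Set.add (win cs L r) c = win cs L (r+1) := by
      rw [PySem.Set.add_of_not_mem g4, win_snoc cs g2 hrlen]
    have hndw : (win cs L (r+1)).Nodup := by
      rw [win_snoc cs g2 hrlen, List.nodup_append]
      refine ⟨g5, List.nodup_singleton _, ?_⟩
      intro x hx y hy
      rw [List.mem_singleton] at hy
      subst hy
      exact fun h => g4 (by rw [hc_def, ← h]; exact hx)
    have hle : (r : Int) - (L : Int) + 1 ≤ k := by
      have : (L : Int) ≥ left := by exact_mod_cast g1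
      omega
    have hstep2 : ∀ res : List String, fkStep cs k (win cs left r, res, left) r =
        (if (((r : Int) - (L : Int) + 1) == k) then
          (PySem.Set.discard (PySem.Set.add (win cs L r) c) (cs.getD L ' '),
           res ++ [String.ofList (PySem.List.slice cs (some (L : Int)) (some ((r : Int) + 1)))],
           L + 1)
         else (PySem.Set.add (win cs L r) c, res, L)) := by
      intro res
      unfold fkStep
      rw [g3]
    by_cases hek : (r : Int) - (L : Int) + 1 = k
    · -- emission step
      have hLk : L + k.toNat = r + 1 := by omega
      have hslice : PySem.List.slice cs (some (L : Int)) (some ((r : Int) + 1))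
          = win cs L (r+1) := by
        rw [show ((r : Int) + 1) = ((L : Nat) : Int) + (((r + 1 - L : Nat)) : Int) by omega,
          PySem.List.slice_natCast_add]
        rfl
      have hres : resUpTo cs k.toNat (r+1)
          = resUpTo cs k.toNat r ++ [String.ofList (win cs L (r+1))] := by
        unfold resUpTo
        rw [show r + 1 + 1 - k.toNat = (r + 1 - k.toNat) + 1 by omega,
          List.range_succ, List.filterMap_append]
        congr 1
        have hiL : r + 1 - k.toNat = L := by omega
        simp only [List.filterMap, hiL, hLk, if_pos hndw]
      refine ⟨L + 1, by omega, by push_cast; omega, win_nodup_tail cs hndw, ?_, ?_⟩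
      · intro l hl
        rcases Nat.lt_succ_iff_lt_or_eq.1 hl with hl' | hl'
        · rcases Nat.lt_or_ge l left with h | h
          · rcases h4 l h with h' | h'
            · exact Or.inl (win_not_nodup_mono cs (by omega) hrlen h')
            · right; push_cast; omega
          · exact Or.inl (not_nodup_snoc cs (by omega) hrlen (g6 l h hl'))
        · subst hl'; right; omega
      · rw [hstep, hstep2, if_pos (beq_iff_eq.mpr hek), haddw, hslice, hres,
          discard_win cs (show L < r + 1 by omega) (show L < cs.length by omega) hndw]
    · -- no emission
      have hlt : (r : Int) - (L : Int) + 1 < k := by omega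
      have hres : resUpTo cs k.toNat (r+1) = resUpTo cs k.toNat r := by
        unfold resUpTo
        by_cases hkn : k.toNat ≤ r + 1
        · rw [show r + 1 + 1 - k.toNat = (r + 1 - k.toNat) + 1 by omega,
            List.range_succ, List.filterMap_append]
          have hi : (r + 1 - k.toNat) + k.toNat = r + 1 := by omega
          have hiL : r + 1 - k.toNat < L := by omega
          have hnn : ¬ (win cs (r + 1 - k.toNat) ((r + 1 - k.toNat) + k.toNat)).Nodup := by
            rw [hi]
            rcases Nat.lt_or_ge (r + 1 - k.toNat) left with h | h
            · rcases h4 _ h with h' | h'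
              · exact win_not_nodup_mono cs (by omega) hrlen h'
              · exfalso; omega
            · exact not_nodup_snoc cs (by omega) hrlen (g6 _ h hiL)
          simp [List.filterMap, if_neg hnn]
        · rw [show r + 1 + 1 - k.toNat = 0 by omega, show r + 1 - k.toNat = 0 by omega]
      refine ⟨L, by omega, by omega, hndw, ?_, ?_⟩
      · intro l hl
        rcases Nat.lt_or_ge l left with h | h
        · rcases h4 l h with h' | h'
          · exact Or.inl (win_not_nodup_mono cs (by omega) hrlen h')
          · right; push_cast; omega
        · exact Or.inl (not_nodup_snoc cs (by omega) hrlen (g6 l h hl))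
      · rw [hstep, hstep2, if_neg (by rw [beq_iff_eq]; exact hek), haddw, hres]

lemma loopA0 (cs : List Char) (k : Int) (hk : k ≤ 0) (r : Nat) (hr : r ≤ cs.length) :
    ∃ left, left ≤ r ∧ (win cs left r).Nodup ∧
      (List.range r).foldl (fkStep cs k) (PySem.Set.empty, ([], 0)) =
        (win cs left r, ([] : List String), left) := by
  induction r with
  | zero => exact ⟨0, le_refl _, by simp [win], by simp [win, PySem.Set.empty]⟩
  | succ r ih =>
    obtain ⟨left, h1, h3, h5⟩ := ih (by omega)
    set c := cs.getD r ' ' with hc_def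
    obtain ⟨L, g1, g2, g3, g4, g5, g6⟩ :=
      fkWhile_spec cs c cs.length left r h1 (by omega) (by omega) h3
    have hrlen : r < cs.length := by omega
    have haddw : PySem.Set.add (win cs L r) c = win cs L (r+1) := by
      rw [PySem.Set.add_of_not_mem g4, win_snoc cs g2 hrlen]
    have hndw : (win cs L (r+1)).Nodup := by
      rw [win_snoc cs g2 hrlen, List.nodup_append]
      refine ⟨g5, List.nodup_singleton _, ?_⟩
      intro x hx y hy
      rw [List.mem_singleton] at hy
      subst hy
      exact fun h => g4 (by rw [hc_def, ← h]; exact hx)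
    have hne : ¬ ((r : Int) - (L : Int) + 1 = k) := by
      have : (L : Int) ≤ r := by exact_mod_cast g2
      omega
    refine ⟨L, by omega, hndw, ?_⟩
    rw [List.range_succ, List.foldl_append, h5]
    show fkStep cs k (win cs left r, [], left) r = _
    unfold fkStep
    rw [g3]
    rw [if_neg (by rw [beq_iff_eq]; exact hne), haddw]

lemma length_ofList_eq_iff (w : List Char) :
    (PySem.Set.ofList w).length = w.length ↔ w.Nodup := by
  constructor
  · intro h
    induction w using List.reverseRecOn with
    | nil => simp
    | append_singleton xs x ih =>
      rw [PySem.Set.ofList_append_singleton] at h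
      by_cases hx : x ∈ xs
      · exfalso
        rw [PySem.Set.add_of_mem (by simpa [PySem.Set.mem_ofList])] at h
        have := PySem.Set.length_ofList_le xs
        simp at h
        omega
      · rw [PySem.Set.add_of_not_mem (by simpa [PySem.Set.mem_ofList])] at h
        simp at h
        rw [List.nodup_append]
        refine ⟨ih h, List.nodup_singleton _, ?_⟩
        intro a ha b hb
        rw [List.mem_singleton] at hb
        subst hb
        exact fun h => hx (h ▸ ha)
  · intro h
    rw [PySem.Set.ofList_eq_self_of_nodup w h]

-- ===== VERDICT (by name: the statement is the Claim_ definition above) =====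
theorem findKLengthSubstringsWithNoRepeatedCharacters_spec : Claim_equal_findKLengthSubstringsWithNoRepeatedCharacters := by
  intro s k _
  unfold Spec_findKLengthSubstringsWithNoRepeatedCharacters
  unfold findKLengthSubstringsWithNoRepeatedCharacters findKLengthSubstringsWithNoRepeatedCharacters_alt
  set cs := s.toList with hcs
  set n := cs.length with hn
  by_cases hkn : k > (n : Int)
  · rw [if_pos hkn, if_pos (Or.inr hkn)]
  · rw [if_neg hkn]
    by_cases hk1 : k < 1
    · rw [if_pos (Or.inl hk1)]
      obtain ⟨left, _, _, h5⟩ := loopA0 cs k (by omega) n (le_refl _)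
      rw [h5]
    · rw [if_neg (not_or.mpr ⟨by omega, by omega⟩)]
      obtain ⟨left, _, _, _, _, h5⟩ := loopA cs k (by omega) n (le_refl _)
      rw [h5]
      show resUpTo cs k.toNat n = _
      unfold resUpTo
      have hrange : ((n : Int) - k + 1).toNat = n + 1 - k.toNat := by omega
      rw [hrange]
      apply List.filterMap_congr
      intro i hi
      rw [List.mem_range] at hi
      have hik : i + k.toNat ≤ n := by omega
      have hslice : PySem.List.slice cs (some (i : Int)) (some ((i : Int) + k))
          = win cs i (i + k.toNat) := by
        rw [show ((i : Int) + k) = ((i : Nat) : Int) + ((k.toNat : Nat) : Int) by omega,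
          PySem.List.slice_natCast_add]
        simp only [win, Nat.add_sub_cancel_left]
      simp only [hslice]
      have hlen : (win cs i (i + k.toNat)).length = k.toNat :=
        by rw [win_length cs hik]; omega
      by_cases hnd : (win cs i (i + k.toNat)).Nodup
      · rw [if_pos hnd, if_pos]
        rw [beq_iff_eq]
        rw [PySem.Set.ofList_eq_self_of_nodup _ hnd]
        simp [PySem.Set.len, hlen]
        omega
      · rw [if_neg hnd, if_neg]
        rw [beq_iff_eq]
        intro h
        apply hnd
        rw [← length_ofList_eq_iff]
        have : PySem.Set.len (PySem.Set.ofList (win cs i (i + k.toNat))) = k.toNat := by omega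
        simp [PySem.Set.len] at this
        omega
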